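-- pv_equiv track=rewrite | github.com/hatrd/marvelousdesigner | scripts/quality_check.py | _is_in_code_or_html
-- ===== SOURCE A (Python) =====
-- def _is_in_code_or_html(content: str, position: int) -> bool:
--     """指定位置がコードブロックやHTMLタグ内かどうか判定"""
--     before_content = content[:position]
--     current_line = before_content.split('\n')[-1]
--
--     # インラインコード
--     if current_line.count('`') % 2 == 1:
--         return True
--
--     # コードブロック
--     lines_before = before_content.split('\n')
--     code_block_count = 0
--     for line in lines_before:
--         if line.strip().startswith('```'):
--             code_block_count += 1
--     if code_block_count % 2 == 1:
--         return True
--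
--     # HTMLタグ内（簡易判定）
--     if '<' in current_line and current_line.rfind('<') > current_line.rfind('>'):
--         return True
--
--     return False
-- ===== SOURCE B (Python) =====
-- def _is_in_code_or_html(content: str, position: int) -> bool:
--     # Single forward character scan (DFA) over the prefix: no line splitting,
--     # no per-line re-scans; per-line state is reset at each '\n'.
--     tick_odd = False          # odd number of '`' on the current line
--     open_tag = False          # last of '<'/'>' seen on the current line is '<'
--     fences = 0                # completed lines whose stripped form starts with ```
--     fstate = 0                # 0: leading ws so far; 1/2: that many leading `; 3: fence; 4: no fence
--     for ch in content[:position]: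
--         if ch == '\n':
--             if fstate == 3:
--                 fences += 1
--             tick_odd = False
--             open_tag = False
--             fstate = 0
--         else:
--             if ch == '`':
--                 tick_odd = not tick_odd
--                 if fstate < 3:
--                     fstate += 1
--             elif fstate == 0 and ch in ' \t\r\x0b\x0c':
--                 pass
--             elif fstate < 3:
--                 fstate = 4
--             if ch == '<':
--                 open_tag = True
--             elif ch == '>':
--                 open_tag = False
--     if fstate == 3:
--         fences += 1
--     return tick_odd or fences % 2 == 1 or open_tag
-- ===== Notes on version B (the rewrite author's own statement) =====
-- stated objective: alternative
-- what changed: Replaced A's several passes (split into lines, backtick count, per-line strip/startswith scan, rfind scans) by a single forward character scan over the prefix maintaining backtick parity, an open-tag flag and a fence-start DFA per line.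
import Mathlib
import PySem

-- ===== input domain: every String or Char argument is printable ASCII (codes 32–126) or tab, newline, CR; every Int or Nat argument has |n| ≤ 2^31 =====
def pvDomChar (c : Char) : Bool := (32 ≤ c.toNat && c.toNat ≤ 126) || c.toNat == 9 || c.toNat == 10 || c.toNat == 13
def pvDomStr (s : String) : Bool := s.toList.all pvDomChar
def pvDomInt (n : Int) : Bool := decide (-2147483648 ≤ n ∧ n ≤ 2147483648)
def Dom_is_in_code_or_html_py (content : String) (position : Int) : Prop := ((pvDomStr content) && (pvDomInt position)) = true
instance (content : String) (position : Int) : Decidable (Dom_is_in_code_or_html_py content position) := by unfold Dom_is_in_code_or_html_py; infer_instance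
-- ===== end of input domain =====

-- B (alternative decomposition): one forward character scan with per-line DFA state instead of A's line splitting and per-line rescans; same O(n) cost.

-- ===== PORT A =====
def is_in_code_or_html_py (content : String) (position : Int) : Bool :=
  let before_content := PySem.Str.slice content none (some position)
  -- split('\n') with a nonempty separator never returns none, so the .getD [] default is dead code
  let lines0 := (PySem.Str.split? before_content "\n").getD []
  -- split(...) always yields at least one piece, so [-1] never fails; the .getD "" default is dead code
  let current_line := (PySem.List.pyGet? lines0 (-1)).getD ""
  if PySem.Str.count current_line "`" % 2 == 1 then true
  else
    let lines_before := (PySem.Str.split? before_content "\n").getD []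
    let code_block_count : Int := lines_before.foldl
      (fun acc line => if PySem.Str.startswith (PySem.Str.strip line) "```" then acc + 1 else acc) 0
    if PySem.Int.mod code_block_count 2 == 1 then true
    else if PySem.Str.isIn "<" current_line
            && decide (PySem.Str.rfind current_line "<" > PySem.Str.rfind current_line ">") then true
    else false

-- ===== PORT B =====
-- the loop body of Source B, written per state component (tick_odd, open_tag, fences, fstate)
def pvStepB (st : Bool × Bool × Int × Int) (ch : Char) : Bool × Bool × Int × Int :=
  if ch == '\n' then
    (false, false, (if st.2.2.2 == 3 then st.2.2.1 + 1 else st.2.2.1), 0)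
  else
    ((if ch == '`' then !st.1 else st.1),
     (if ch == '<' then true else if ch == '>' then false else st.2.1),
     st.2.2.1,
     (if ch == '`' then (if st.2.2.2 < 3 then st.2.2.2 + 1 else st.2.2.2)
      else if st.2.2.2 == 0 && (ch == ' ' || ch == '\t' || ch == '\r' || ch == '\x0b' || ch == '\x0c') then st.2.2.2
      else if st.2.2.2 < 3 then 4 else st.2.2.2))

def is_in_code_or_html_py_alt (content : String) (position : Int) : Bool :=
  let s := (PySem.Str.slice content none (some position)).toList
  let st := s.foldl pvStepB (false, false, 0, 0)
  let fences := if st.2.2.2 == 3 then st.2.2.1 + 1 else st.2.2.1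
  st.1 || PySem.Int.mod fences 2 == 1 || st.2.1

-- ===== PRECONDITION & SPEC =====
def Spec_is_in_code_or_html_py (content : String) (position : Int) (out : Bool) : Prop := out = is_in_code_or_html_py_alt content position
instance (content : String) (position : Int) (out : Bool) : Decidable (Spec_is_in_code_or_html_py content position out) := by unfold Spec_is_in_code_or_html_py; infer_instance

-- ===== CLAIM (what is proved, stated in full; the proofs are below) =====
def Claim_equal_is_in_code_or_html_py : Prop := ∀ (content : String) (position : Int), Dom_is_in_code_or_html_py content position → Spec_is_in_code_or_html_py content position (is_in_code_or_html_py content position)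

-- ===== LEMMAS AND PROOFS =====

-- per-component step functions of pvStepB's non-newline branch
def pvTickStep (b : Bool) (c : Char) : Bool := if c == '`' then !b else b
def pvTagStep (b : Bool) (c : Char) : Bool := if c == '<' then true else if c == '>' then false else b
def pvFsStep (g : Int) (c : Char) : Int :=
  if c == '`' then (if g < 3 then g + 1 else g)
  else if g == 0 && (c == ' ' || c == '\t' || c == '\r' || c == '\x0b' || c == '\x0c') then g
  else if g < 3 then 4 else g

-- structural model of "split on newline"
def pvLines : List Char → List (List Char)
  | [] => [[]]
  | c :: t => if c = '\n' then [] :: pvLines t else (pvLines t).modifyHead (c :: ·)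

def pvSplitStep (dc : List (List Char) × List Char) (c : Char) : List (List Char) × List Char :=
  if c = '\n' then (dc.1 ++ [dc.2], []) else (dc.1, dc.2 ++ [c])

def pvDone (s : List Char) : List (List Char) := (s.foldl pvSplitStep ([], [])).1
def pvCur (s : List Char) : List Char := (s.foldl pvSplitStep ([], [])).2

def pvFence (l : List Char) : Bool := ['`','`','`'].isPrefixOf (PySem.Chars.strip l)


lemma pv_count_go (c : Char) (l : List Char) (acc fuel : Nat) (hf : l.length ≤ fuel) :
    PySem.Chars.count.go [c] fuel l acc = acc + l.count c := by
  induction l generalizing acc fuel with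
  | nil =>
    cases fuel with
    | zero => simp [PySem.Chars.count.go]
    | succ f => simp [PySem.Chars.count.go]
  | cons h t ih =>
    cases fuel with
    | zero => simp at hf
    | succ f =>
      by_cases he : c = h
      · subst he
        rw [show PySem.Chars.count.go [c] (f+1) (c::t) acc = PySem.Chars.count.go [c] f t (acc+1) by
          simp [PySem.Chars.count.go, List.isPrefixOf]]
        rw [ih (acc+1) f (by simp at hf ⊢; omega)]
        simp [List.count_cons]
        omega
      · rw [show PySem.Chars.count.go [c] (f+1) (h::t) acc = PySem.Chars.count.go [c] f t acc by
          simp [PySem.Chars.count.go, List.isPrefixOf, he, Ne.symm he]]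
        rw [ih acc f (by simp at hf ⊢; omega)]
        simp [List.count_cons, Ne.symm he]
lemma pv_count_singleton (s : List Char) (c : Char) : PySem.Chars.count s [c] = s.count c := by
  rw [show PySem.Chars.count s [c] = PySem.Chars.count.go [c] s.length s 0 by simp [PySem.Chars.count]]
  rw [pv_count_go c s 0 s.length le_rfl]; omega

lemma pv_rfind_go_lt (s : List Char) (c : Char) (j : Nat) :
    PySem.Chars.rfind.go s [c] j < (s.length : Int) := by
  induction j with
  | zero =>
    rw [show PySem.Chars.rfind.go s [c] 0 = if [c].isPrefixOf s then 0 else -1 by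
      simp [PySem.Chars.rfind.go]]
    split
    · rename_i hp
      cases s with
      | nil => simp [List.isPrefixOf] at hp
      | cons a b => simp
    · have : (0:Int) ≤ s.length := by positivity
      omega
  | succ j ih =>
    rw [show PySem.Chars.rfind.go s [c] (j+1)
          = if [c].isPrefixOf (s.drop (j+1)) then ((j:Int)+1) else PySem.Chars.rfind.go s [c] j by
      simp [PySem.Chars.rfind.go]]
    split
    · rename_i hp
      have hne : s.drop (j+1) ≠ [] := by
        intro h; rw [h] at hp; simp [List.isPrefixOf] at hp
      have hlt : j + 1 < s.length := by
        by_contra hge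
        exact hne (List.drop_eq_nil_of_le (by omega))
      push_cast; omega
    · exact ih

lemma pv_rfind_lt (s : List Char) (c : Char) : PySem.Chars.rfind s [c] < (s.length : Int) :=
  pv_rfind_go_lt s c s.length

lemma pv_rfind_go_append (l : List Char) (d c : Char) (j : Nat) (hj : j < l.length) :
    PySem.Chars.rfind.go (l ++ [d]) [c] j = PySem.Chars.rfind.go l [c] j := by
  induction j with
  | zero =>
    rw [show PySem.Chars.rfind.go (l ++ [d]) [c] 0 = if [c].isPrefixOf (l ++ [d]) then 0 else -1 by
      simp [PySem.Chars.rfind.go]]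
    rw [show PySem.Chars.rfind.go l [c] 0 = if [c].isPrefixOf l then 0 else -1 by
      simp [PySem.Chars.rfind.go]]
    cases l with
    | nil => simp at hj
    | cons a b => simp [List.isPrefixOf]
  | succ j ih =>
    rw [show PySem.Chars.rfind.go (l ++ [d]) [c] (j+1)
          = if [c].isPrefixOf ((l ++ [d]).drop (j+1)) then ((j:Int)+1) else PySem.Chars.rfind.go (l ++ [d]) [c] j by
      simp [PySem.Chars.rfind.go]]
    rw [show PySem.Chars.rfind.go l [c] (j+1)
          = if [c].isPrefixOf (l.drop (j+1)) then ((j:Int)+1) else PySem.Chars.rfind.go l [c] j by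
      simp [PySem.Chars.rfind.go]]
    have hdrop : (l ++ [d]).drop (j+1) = l.drop (j+1) ++ [d] := List.drop_append_of_le_length (by omega)
    rw [hdrop]
    cases hld : l.drop (j+1) with
    | nil =>
      have : l.length ≤ j + 1 := by
        by_contra hh
        have := List.drop_eq_nil_iff.mp hld
        omega
      omega
    | cons a b =>
      simp only [List.cons_append, List.isPrefixOf]
      split
      · rfl
      · exact ih (by omega)

lemma pv_rfind_append (l : List Char) (d c : Char) :
    PySem.Chars.rfind (l ++ [d]) [c] = if d = c then (l.length : Int) else PySem.Chars.rfind l [c] := by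
  have hlen : (l ++ [d]).length = l.length + 1 := by simp
  rw [show PySem.Chars.rfind (l ++ [d]) [c] = PySem.Chars.rfind.go (l ++ [d]) [c] ((l ++ [d]).length) from rfl]
  rw [hlen]
  rw [show PySem.Chars.rfind.go (l ++ [d]) [c] (l.length+1)
        = if [c].isPrefixOf ((l ++ [d]).drop (l.length+1)) then ((l.length:Int)+1) else PySem.Chars.rfind.go (l ++ [d]) [c] l.length by
    simp [PySem.Chars.rfind.go]]
  have h1 : (l ++ [d]).drop (l.length + 1) = [] := by simp
  rw [h1]
  rw [show ([c].isPrefixOf ([] : List Char)) = false from rfl]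
  simp only [Bool.false_eq_true, if_false]
  cases l with
  | nil =>
    rw [show PySem.Chars.rfind.go ([] ++ [d]) [c] ([] : List Char).length
          = if [c].isPrefixOf ([d]) then 0 else -1 by
      simp [PySem.Chars.rfind.go]]
    rw [show PySem.Chars.rfind ([] : List Char) [c] = PySem.Chars.rfind.go ([] : List Char) [c] 0 from rfl]
    rw [show PySem.Chars.rfind.go ([] : List Char) [c] 0 = if [c].isPrefixOf ([] : List Char) then 0 else -1 by
      simp [PySem.Chars.rfind.go]]
    simp [List.isPrefixOf]
    by_cases h : c = d
    · subst h; simp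
    · simp [h, Ne.symm h]
  | cons a t =>
    have hlen2 : (a :: t).length = t.length + 1 := rfl
    rw [hlen2]
    rw [show PySem.Chars.rfind.go ((a :: t) ++ [d]) [c] (t.length+1)
          = if [c].isPrefixOf (((a :: t) ++ [d]).drop (t.length+1)) then ((t.length:Int)+1) else PySem.Chars.rfind.go ((a :: t) ++ [d]) [c] t.length by
      simp [PySem.Chars.rfind.go]]
    have h2 : ((a :: t) ++ [d]).drop (t.length + 1) = [d] := by
      rw [List.drop_append_of_le_length (by simp)]
      simp
    rw [h2]
    rw [pv_rfind_go_append (a :: t) d c t.length (by simp)]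
    rw [show PySem.Chars.rfind (a :: t) [c] = PySem.Chars.rfind.go (a :: t) [c] (t.length+1) from rfl]
    rw [show PySem.Chars.rfind.go (a :: t) [c] (t.length+1)
          = if [c].isPrefixOf ((a :: t).drop (t.length+1)) then ((t.length:Int)+1) else PySem.Chars.rfind.go (a :: t) [c] t.length by
      simp [PySem.Chars.rfind.go]]
    have h3 : (a :: t).drop (t.length + 1) = [] := by simp
    rw [h3]
    rw [show ([c].isPrefixOf ([] : List Char)) = false from rfl]
    simp only [Bool.false_eq_true, if_false]
    by_cases h : c = d
    · subst h; simp
    · simp [h, Ne.symm h]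

lemma pv_isIn_singleton (c : Char) (l : List Char) : PySem.Chars.isIn [c] l = decide (c ∈ l) := by
  by_cases h : c ∈ l
  · obtain ⟨s1, t1, rfl⟩ := List.append_of_mem h
    have : [c] <:+: s1 ++ c :: t1 := ⟨s1, t1, by simp⟩
    simp [h, (PySem.Chars.isIn_iff_infix [c] _).mpr this]
  · have : PySem.Chars.isIn [c] l = false := by
      rw [PySem.Chars.isIn_eq_false_iff]
      intro hinf
      exact h (hinf.subset (by simp))
    simp [h, this]

lemma pvLines_ne_nil (s : List Char) : pvLines s ≠ [] := by
  induction s with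
  | nil => simp [pvLines]
  | cons c t ih =>
    simp only [pvLines]; split
    · simp
    · cases h : pvLines t with
      | nil => exact absurd h ih
      | cons a b => simp

lemma pv_splitOn_go (l cur : List Char) (acc : List (List Char)) (fuel : Nat)
    (hf : l.length < fuel) :
    PySem.Chars.splitOn.go ['\n'] fuel l cur acc = acc.reverse ++ (pvLines l).modifyHead (cur.reverse ++ ·) := by
  induction l generalizing cur acc fuel with
  | nil =>
    cases fuel with
    | zero => omega
    | succ f => simp [PySem.Chars.splitOn.go, pvLines]
  | cons c rest ih =>
    cases fuel with
    | zero => omega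
    | succ f =>
      by_cases h : c = '\n'
      · subst h
        rw [show PySem.Chars.splitOn.go ['\n'] (f+1) ('\n'::rest) cur acc
              = PySem.Chars.splitOn.go ['\n'] f rest [] (cur.reverse :: acc) by
            simp [PySem.Chars.splitOn.go, List.isPrefixOf]]
        rw [ih [] (cur.reverse :: acc) f (by simp at hf ⊢; omega)]
        cases h2 : pvLines rest with
        | nil => exact absurd h2 (pvLines_ne_nil rest)
        | cons a b => simp [pvLines, h2]
      · rw [show PySem.Chars.splitOn.go ['\n'] (f+1) (c::rest) cur acc
              = PySem.Chars.splitOn.go ['\n'] f rest (c :: cur) acc by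
            simp [PySem.Chars.splitOn.go, List.isPrefixOf, h, Ne.symm h]]
        rw [ih (c :: cur) acc f (by simp at hf ⊢; omega)]
        cases h2 : pvLines rest with
        | nil => exact absurd h2 (pvLines_ne_nil rest)
        | cons a b => simp [pvLines, h, h2]

lemma pv_splitOn_eq (s : List Char) : PySem.Chars.splitOn s ['\n'] = pvLines s := by
  rw [show PySem.Chars.splitOn s ['\n'] = PySem.Chars.splitOn.go ['\n'] (s.length + 1) s [] [] from rfl]
  rw [pv_splitOn_go s [] [] (s.length+1) (by omega)]
  cases h2 : pvLines s with
  | nil => exact absurd h2 (pvLines_ne_nil s)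
  | cons a b => simp

lemma pv_split_gen (s : List Char) (done : List (List Char)) (cur : List Char) :
    (s.foldl pvSplitStep (done, cur)).1 ++ [(s.foldl pvSplitStep (done, cur)).2]
      = done ++ (pvLines s).modifyHead (cur ++ ·) := by
  induction s generalizing done cur with
  | nil => simp [pvLines]
  | cons c t ih =>
    by_cases h : c = '\n'
    · subst h
      rw [show List.foldl pvSplitStep (done, cur) ('\n' :: t) = List.foldl pvSplitStep (done ++ [cur], []) t by
        simp [pvSplitStep]]
      rw [ih]
      cases h2 : pvLines t with
      | nil => exact absurd h2 (pvLines_ne_nil t)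
      | cons a b => simp [pvLines, h2]
    · rw [show List.foldl pvSplitStep (done, cur) (c :: t) = List.foldl pvSplitStep (done, cur ++ [c]) t by
        simp [pvSplitStep, h]]
      rw [ih]
      cases h2 : pvLines t with
      | nil => exact absurd h2 (pvLines_ne_nil t)
      | cons a b => simp [pvLines, h, h2]

lemma pvLines_eq_done_cur (s : List Char) : pvLines s = pvDone s ++ [pvCur s] := by
  have := pv_split_gen s [] []
  cases h2 : pvLines s with
  | nil => exact absurd h2 (pvLines_ne_nil s)
  | cons a b =>
    rw [h2] at this
    simp at this
    rw [← this]
    rfl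

lemma pv_line_chars (s : List Char) (l : List Char)
    (hl : l ∈ pvDone s ++ [pvCur s]) : ∀ c ∈ l, c ∈ s ∧ c ≠ '\n' := by
  induction s using List.reverseRecOn generalizing l with
  | nil =>
    simp [pvDone, pvCur] at hl
    subst hl; simp
  | append_singleton s d ih =>
    have hD : pvDone (s ++ [d]) = (pvSplitStep (pvDone s, pvCur s) d).1 := by
      simp [pvDone, pvCur, List.foldl_append]
    have hC : pvCur (s ++ [d]) = (pvSplitStep (pvDone s, pvCur s) d).2 := by
      simp [pvDone, pvCur, List.foldl_append]
    by_cases h : d = '\n'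
    · subst h
      rw [hD, hC] at hl
      simp only [pvSplitStep, if_pos rfl] at hl
      intro c hc
      rcases List.mem_append.mp hl with h1 | h1
      · rcases List.mem_append.mp h1 with h2 | h2
        · have := ih l (List.mem_append.mpr (Or.inl h2)) c hc
          exact ⟨List.mem_append.mpr (Or.inl this.1), this.2⟩
        · have := ih l (List.mem_append.mpr (Or.inr h2)) c hc
          exact ⟨List.mem_append.mpr (Or.inl this.1), this.2⟩
      · simp at h1; subst h1; simp at hc
    · rw [hD, hC] at hl
      simp only [pvSplitStep, if_neg h] at hl
      intro c hc
      rcases List.mem_append.mp hl with h1 | h1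
      · have := ih l (List.mem_append.mpr (Or.inl h1)) c hc
        exact ⟨List.mem_append.mpr (Or.inl this.1), this.2⟩
      · simp at h1; subst h1
        rcases List.mem_append.mp hc with h2 | h2
        · have := ih (pvCur s) (by simp) c h2
          exact ⟨List.mem_append.mpr (Or.inl this.1), this.2⟩
        · simp at h2; subst h2
          exact ⟨by simp, h⟩

lemma pv_foldB (s : List Char) :
    s.foldl pvStepB (false, false, 0, 0) =
      (pvCur s |>.foldl pvTickStep false,
       pvCur s |>.foldl pvTagStep false,
       ((pvDone s).countP (fun l => l.foldl pvFsStep 0 == 3) : Int),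
       pvCur s |>.foldl pvFsStep 0) := by
  induction s using List.reverseRecOn with
  | nil => simp [pvDone, pvCur]
  | append_singleton s d ih =>
    rw [List.foldl_append, ih]
    have hD : pvDone (s ++ [d]) = (pvSplitStep (pvDone s, pvCur s) d).1 := by
      simp [pvDone, pvCur, List.foldl_append]
    have hC : pvCur (s ++ [d]) = (pvSplitStep (pvDone s, pvCur s) d).2 := by
      simp [pvDone, pvCur, List.foldl_append]
    by_cases h : d = '\n'
    · subst h
      rw [hD, hC]
      simp only [pvSplitStep, if_pos rfl]
      simp only [List.foldl, pvStepB, List.countP_append, List.countP_cons, List.countP_nil]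
      simp only [beq_self_eq_true, if_pos rfl]
      cases h3 : (List.foldl pvFsStep 0 (pvCur s) == 3) <;> simp [h3]
    · rw [hD, hC]
      simp only [pvSplitStep, if_neg h]
      have hne : (d == '\n') = false := by simp [h]
      simp only [List.foldl_append, List.foldl, pvStepB, hne, Bool.false_eq_true, if_false]
      rfl

lemma pv_tick_eq (l : List Char) (b : Bool) :
    l.foldl pvTickStep b = (b ^^ decide (l.count '`' % 2 = 1)) := by
  induction l generalizing b with
  | nil => simp
  | cons c t ih =>
    by_cases h : c = '`'
    · subst h
      rw [show List.foldl pvTickStep b ('`' :: t) = List.foldl pvTickStep (!b) t by simp [pvTickStep]]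
      rw [ih]
      have hpar : decide ((t.count '`' + 1) % 2 = 1) = !decide (t.count '`' % 2 = 1) := by
        rcases Nat.mod_two_eq_zero_or_one (t.count '`') with h2 | h2 <;> simp [Nat.add_mod, h2]
      simp [List.count_cons, hpar]
    · rw [show List.foldl pvTickStep b (c :: t) = List.foldl pvTickStep b t by simp [pvTickStep, h]]
      rw [ih]
      simp [List.count_cons, h]

lemma pv_tag_eq (l : List Char) :
    l.foldl pvTagStep false =
      (decide ('<' ∈ l) && decide (PySem.Chars.rfind l ['<'] > PySem.Chars.rfind l ['>'])) := by
  induction l using List.reverseRecOn with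
  | nil =>
    have h1 : PySem.Chars.rfind ([] : List Char) ['<'] = -1 := by decide
    have h2 : PySem.Chars.rfind ([] : List Char) ['>'] = -1 := by decide
    simp [h1, h2]
  | append_singleton l d ih =>
    rw [List.foldl_append, List.foldl, List.foldl, ih]
    rw [pv_rfind_append, pv_rfind_append]
    by_cases h1 : d = '<'
    · subst h1
      have := pv_rfind_lt l '>'
      simp [pvTagStep]
      omega
    · by_cases h2 : d = '>'
      · subst h2
        have := pv_rfind_lt l '<'
        simp [pvTagStep, h1]
        omega
      · simp [pvTagStep, h1, h2, Ne.symm h1]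

lemma pv_ws_iff (c : Char) (hc : pvDomChar c = true) (hn : c ≠ '\n') :
    PySem.Chars.isspace c = (c == ' ' || c == '\t' || c == '\r' || c == '\x0b' || c == '\x0c') := by
  have hofn : ∀ (d : Char), c.toNat = d.toNat → c = d := by
    intro d h
    have h1 := Char.ofNat_toNat c
    have h2 := Char.ofNat_toNat d
    rw [h] at h1
    rw [h2] at h1
    exact h1.symm
  have hn10 : c.toNat ≠ 10 := fun h => hn (hofn '\n' h)
  simp only [pvDomChar, Bool.or_eq_true, Bool.and_eq_true, decide_eq_true_eq, beq_iff_eq] at hc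
  rw [Bool.eq_iff_iff]
  simp only [PySem.Chars.isspace, Bool.or_eq_true, Bool.and_eq_true, decide_eq_true_eq, beq_iff_eq]
  constructor
  · intro h
    have : c.toNat = 32 ∨ c.toNat = 9 ∨ c.toNat = 13 := by omega
    rcases this with h2 | h2 | h2
    · exact Or.inl (Or.inl (Or.inl (Or.inl (hofn ' ' h2))))
    · exact Or.inl (Or.inl (Or.inl (Or.inr (hofn '\t' h2))))
    · exact Or.inl (Or.inl (Or.inr (hofn '\r' h2)))
  · intro h
    rcases h with ((((rfl | rfl) | rfl) | rfl) | rfl) <;> simp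

lemma pv_rstrip_append (m : List Char) (d : Char) :
    PySem.Chars.rstrip (m ++ [d]) = if PySem.Chars.isspace d then PySem.Chars.rstrip m else m ++ [d] := by
  simp only [PySem.Chars.rstrip, List.reverse_append, List.reverse_cons, List.reverse_nil,
    List.nil_append, List.singleton_append, List.dropWhile_cons]
  split <;> simp_all

lemma pv_rstrip_prefix (m : List Char) :
    ['`','`','`'].isPrefixOf (PySem.Chars.rstrip m) = ['`','`','`'].isPrefixOf m := by
  induction m using List.reverseRecOn with
  | nil => rfl
  | append_singleton m d ih =>
    rw [pv_rstrip_append]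
    by_cases hws : PySem.Chars.isspace d
    · rw [if_pos hws, ih]
      rw [Bool.eq_iff_iff, List.isPrefixOf_iff_prefix, List.isPrefixOf_iff_prefix]
      constructor
      · intro h
        exact h.trans (List.prefix_append m [d])
      · intro h
        by_cases hm : 3 ≤ m.length
        · rw [List.prefix_iff_eq_take] at h
          rw [List.take_append_of_le_length (by simpa using hm)] at h
          rw [List.prefix_iff_eq_take]
          simpa using h
        · exfalso
          have hlen : m.length + 1 ≥ 3 := by
            have := h.length_le
            simpa using this
          have hm2 : m.length = 2 := by omega
          rw [List.prefix_iff_eq_take] at h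
          have : m ++ [d] = ['`','`','`'] := by
            rw [List.take_of_length_le (by simp; omega)] at h
            exact h.symm
          match m, hm2 with
          | [a, b], _ =>
            simp at this
            obtain ⟨-, -, hd⟩ := this
            subst hd
            exact absurd hws (by decide)
    · rw [if_neg hws]


lemma pv_fs3 (t : List Char) : t.foldl pvFsStep 3 = 3 := by
  induction t with
  | nil => rfl
  | cons c r ih =>
    rw [show List.foldl pvFsStep 3 (c :: r) = List.foldl pvFsStep 3 r by
      rcases hc : (c == '`') <;> simp [pvFsStep, hc]]
    exact ih

lemma pv_fs4 (t : List Char) : t.foldl pvFsStep 4 = 4 := by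
  induction t with
  | nil => rfl
  | cons c r ih =>
    rw [show List.foldl pvFsStep 4 (c :: r) = List.foldl pvFsStep 4 r by
      rcases hc : (c == '`') <;> simp [pvFsStep, hc]]
    exact ih

lemma pv_fs2 (t : List Char) : (t.foldl pvFsStep 2 = 3) ↔ ['`'].isPrefixOf t = true := by
  cases t with
  | nil => simp [List.isPrefixOf]
  | cons c r =>
    by_cases h : c = '`'
    · subst h
      rw [show List.foldl pvFsStep 2 ('`' :: r) = List.foldl pvFsStep 3 r by simp [pvFsStep]]
      simp [pv_fs3, List.isPrefixOf]
    · rw [show List.foldl pvFsStep 2 (c :: r) = List.foldl pvFsStep 4 r by simp [pvFsStep, h]]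
      simp [pv_fs4, List.isPrefixOf, h, Ne.symm h]

lemma pv_fs1 (t : List Char) : (t.foldl pvFsStep 1 = 3) ↔ ['`','`'].isPrefixOf t = true := by
  cases t with
  | nil => simp [List.isPrefixOf]
  | cons c r =>
    by_cases h : c = '`'
    · subst h
      rw [show List.foldl pvFsStep 1 ('`' :: r) = List.foldl pvFsStep 2 r by simp [pvFsStep]]
      simp [pv_fs2, List.isPrefixOf]
    · rw [show List.foldl pvFsStep 1 (c :: r) = List.foldl pvFsStep 4 r by simp [pvFsStep, h]]
      simp [pv_fs4, List.isPrefixOf, h]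
      exact fun hh _ => h hh.symm

lemma pv_fs0 (t : List Char) (hd : ∀ c ∈ t, pvDomChar c = true ∧ c ≠ '\n') :
    (t.foldl pvFsStep 0 = 3) ↔ ['`','`','`'].isPrefixOf (t.dropWhile PySem.Chars.isspace) = true := by
  induction t with
  | nil => simp [List.isPrefixOf]
  | cons c r ih =>
    by_cases h : c = '`'
    · subst h
      rw [show List.foldl pvFsStep 0 ('`' :: r) = List.foldl pvFsStep 1 r by simp [pvFsStep]]
      rw [List.dropWhile_cons_of_neg (by decide)]
      simp [pv_fs1, List.isPrefixOf]
    · have hc := hd c (by simp)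
      have hws5 := pv_ws_iff c hc.1 hc.2
      by_cases hsp : PySem.Chars.isspace c = true
      · have h5 : (c == ' ' || c == '\t' || c == '\r' || c == '\x0b' || c == '\x0c') = true := by
          rw [← hws5]; exact hsp
        rw [show List.foldl pvFsStep 0 (c :: r) = List.foldl pvFsStep 0 r by
          simp [pvFsStep, h, h5]]
        rw [List.dropWhile_cons_of_pos hsp]
        exact ih (fun c hcm => hd c (by simp [hcm]))
      · have h5 : (c == ' ' || c == '\t' || c == '\r' || c == '\x0b' || c == '\x0c') = false := by
          rw [← hws5]; simpa using hsp
        rw [show List.foldl pvFsStep 0 (c :: r) = List.foldl pvFsStep 4 r by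
          simp [pvFsStep, h, h5]]
        rw [List.dropWhile_cons_of_neg (by simpa using hsp)]
        simp [pv_fs4, List.isPrefixOf, h]
        exact fun hh _ => h hh.symm

lemma pv_fs_eq (l : List Char) (hd : ∀ c ∈ l, pvDomChar c = true ∧ c ≠ '\n') :
    (l.foldl pvFsStep 0 == 3) = pvFence l := by
  rw [Bool.eq_iff_iff, beq_iff_eq]
  rw [pv_fs0 l hd]
  unfold pvFence
  rw [show PySem.Chars.strip l = PySem.Chars.rstrip (PySem.Chars.lstrip l) from rfl]
  rw [pv_rstrip_prefix]
  rw [show PySem.Chars.lstrip l = l.dropWhile PySem.Chars.isspace from rfl]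

lemma pv_last_line (D : List (List Char)) (cL : List Char) (d : String) :
    (PySem.List.pyGet? ((D ++ [cL]).map String.ofList) (-1)).getD d = String.ofList cL := by
  have hidx : PySem.List.pyIdx? (((D ++ [cL]).map String.ofList).length) (-1) = some D.length := by
    simp [PySem.List.pyIdx?]
  rw [PySem.List.pyGet?, hidx]
  have h3 : ((D ++ [cL]).map String.ofList)[D.length]? = some (String.ofList cL) := by
    rw [show (D ++ [cL]).map String.ofList = D.map String.ofList ++ [String.ofList cL] by simp,
        show D.length = (D.map String.ofList).length by simp]
    exact List.getElem?_concat_length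
  simp [h3]

theorem pv_core (s : List Char) (hdom : ∀ c ∈ s, pvDomChar c = true) :
    (let lines0 := (pvLines s).map String.ofList
     let current_line := (PySem.List.pyGet? lines0 (-1)).getD ""
     if PySem.Str.count current_line "`" % 2 == 1 then true
     else
       let code_block_count : Int := lines0.foldl
         (fun acc line => if PySem.Str.startswith (PySem.Str.strip line) "```" then acc + 1 else acc) 0
       if PySem.Int.mod code_block_count 2 == 1 then true
       else if PySem.Str.isIn "<" current_line
               && decide (PySem.Str.rfind current_line "<" > PySem.Str.rfind current_line ">") then true
       else false) =
    (let st := s.foldl pvStepB (false, false, 0, 0)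
     let fences := if st.2.2.2 == 3 then st.2.2.1 + 1 else st.2.2.1
     st.1 || PySem.Int.mod fences 2 == 1 || st.2.1) := by
  have hdc : ∀ l ∈ pvDone s ++ [pvCur s], ∀ c ∈ l, pvDomChar c = true ∧ c ≠ '\n' := by
    intro l hl c hc
    have h := pv_line_chars s l hl c hc
    exact ⟨hdom c h.1, h.2⟩
  have ht1 : (PySem.Str.count (String.ofList (pvCur s)) "`" % 2 == 1)
      = (pvCur s).foldl pvTickStep false := by
    rw [pv_tick_eq]
    have hcnt : PySem.Str.count (String.ofList (pvCur s)) "`" = (pvCur s).count '`' := by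
      rw [PySem.Str.count]
      rw [show ("`" : String).toList = ['`'] from rfl]
      rw [show (String.ofList (pvCur s)).toList = pvCur s by simp]
      exact pv_count_singleton _ _
    rw [hcnt, Bool.eq_iff_iff]
    simp
  have hsw : ∀ l : List Char,
      PySem.Str.startswith (PySem.Str.strip (String.ofList l)) "```" = pvFence l := by
    intro l
    rw [PySem.Str.startswith, PySem.Str.strip]
    rw [show ("```" : String).toList = ['`','`','`'] from rfl]
    rw [show (String.ofList (PySem.Chars.strip (String.ofList l).toList)).toList
          = PySem.Chars.strip (String.ofList l).toList by simp]
    rw [show (String.ofList l).toList = l by simp]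
    rfl
  have hfold : ((pvDone s ++ [pvCur s]).map String.ofList).foldl
      (fun acc line => if PySem.Str.startswith (PySem.Str.strip line) "```" then acc + 1 else acc) (0:Int)
      = ((pvDone s ++ [pvCur s]).countP pvFence : Int) := by
    rw [List.foldl_map]
    simp only [hsw]
    rw [PySem.List.foldl_if_add_one]
    simp
  have ht3 : (PySem.Str.isIn "<" (String.ofList (pvCur s))
        && decide (PySem.Str.rfind (String.ofList (pvCur s)) "<" > PySem.Str.rfind (String.ofList (pvCur s)) ">"))
      = (pvCur s).foldl pvTagStep false := by
    rw [pv_tag_eq]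
    rw [PySem.Str.isIn, PySem.Str.rfind, PySem.Str.rfind]
    rw [show ("<" : String).toList = ['<'] from rfl, show (">" : String).toList = ['>'] from rfl]
    rw [show (String.ofList (pvCur s)).toList = pvCur s by simp]
    rw [pv_isIn_singleton]
  have hcnt2 : (pvDone s).countP (fun l => l.foldl pvFsStep 0 == 3) = (pvDone s).countP pvFence := by
    apply List.countP_congr
    intro l hl
    rw [pv_fs_eq l (hdc l (List.mem_append.mpr (Or.inl hl)))]
  have hfsC : ((pvCur s).foldl pvFsStep 0 == 3) = pvFence (pvCur s) :=
    pv_fs_eq _ (hdc _ (by simp))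
  have hint : (if ((pvCur s).foldl pvFsStep 0 == 3)
        then ((pvDone s).countP (fun l => l.foldl pvFsStep 0 == 3) : Int) + 1
        else ((pvDone s).countP (fun l => l.foldl pvFsStep 0 == 3) : Int))
      = ((pvDone s ++ [pvCur s]).countP pvFence : Int) := by
    rw [hfsC, hcnt2, List.countP_append]
    cases h : pvFence (pvCur s) <;> simp [h]
  dsimp only
  rw [pvLines_eq_done_cur s, pv_last_line, pv_foldB]
  dsimp only
  rw [ht1, hfold, ht3, hint]
  cases ((pvCur s).foldl pvTickStep false) <;>
    cases (PySem.Int.mod ((pvDone s ++ [pvCur s]).countP pvFence : Int) 2 == 1) <;>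
      cases ((pvCur s).foldl pvTagStep false) <;> simp_all

-- ===== VERDICT (by name: the statement is the Claim_ definition above) =====
theorem is_in_code_or_html_py_spec : Claim_equal_is_in_code_or_html_py := by
  intro content position hD
  unfold Spec_is_in_code_or_html_py
  unfold is_in_code_or_html_py is_in_code_or_html_py_alt
  have hdom : ∀ c ∈ (PySem.Str.slice content none (some position)).toList, pvDomChar c = true := by
    intro c hc
    have hmem : c ∈ content.toList := by
      rw [PySem.Str.toList_slice, PySem.Chars.slice_eq_listSlice] at hc
      exact PySem.List.mem_of_mem_slice _ _ _ hc
    have h1 : pvDomStr content = true := by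
      unfold Dom_is_in_code_or_html_py at hD
      exact ((Bool.and_eq_true _ _ ▸ hD : pvDomStr content = true ∧ pvDomInt position = true)).1
    exact List.all_eq_true.mp h1 c hmem
  have hsplit : (PySem.Str.split? (PySem.Str.slice content none (some position)) "\n").getD []
      = (pvLines ((PySem.Str.slice content none (some position)).toList)).map String.ofList := by
    rw [PySem.Str.split?]
    rw [show ("\n" : String).toList = ['\n'] from rfl]
    rw [show PySem.Chars.split? (PySem.Str.slice content none (some position)).toList ['\n']
          = some (PySem.Chars.splitOn (PySem.Str.slice content none (some position)).toList ['\n']) by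
        simp [PySem.Chars.split?]]
    rw [pv_splitOn_eq]
    rfl
  have h := pv_core ((PySem.Str.slice content none (some position)).toList) hdom
  dsimp only at h ⊢
  rw [hsplit]
  exact h
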